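-- pv_equiv track=rewrite | github.com/Andante-Kim/algorithms-log | basic_BaekJoon/1316(re).py | check_groupWord
-- ===== SOURCE A (Python) =====
-- def check_groupWord(word):
--     check_set = set()
--     alphabet = word[0]
--     check_set.add(alphabet)
--
--     for a in word:
--         if a == alphabet:
--             continue
--         else:
--             if a in check_set:
--                 return 0
--             else:
--                 alphabet = a
--                 check_set.add(a)
--
--     return 1
-- ===== SOURCE B (Python) =====
-- def check_groupWord(word):
--     runs = []
--     for c in word:
--         if not runs or runs[-1] != c:
--             runs.append(c)
--     return 1 if len(runs) == len(set(runs)) else 0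
-- ===== Notes on version B (the rewrite author's own statement) =====
-- stated objective: simpler
-- what changed: Replaces A's incremental previous-letter-plus-seen-set scan with a two-phase shape: first collapse consecutive equal letters into the run sequence, then the word is a group word iff the run sequence has no duplicate (len(runs) == len(set(runs))).
import Mathlib
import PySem

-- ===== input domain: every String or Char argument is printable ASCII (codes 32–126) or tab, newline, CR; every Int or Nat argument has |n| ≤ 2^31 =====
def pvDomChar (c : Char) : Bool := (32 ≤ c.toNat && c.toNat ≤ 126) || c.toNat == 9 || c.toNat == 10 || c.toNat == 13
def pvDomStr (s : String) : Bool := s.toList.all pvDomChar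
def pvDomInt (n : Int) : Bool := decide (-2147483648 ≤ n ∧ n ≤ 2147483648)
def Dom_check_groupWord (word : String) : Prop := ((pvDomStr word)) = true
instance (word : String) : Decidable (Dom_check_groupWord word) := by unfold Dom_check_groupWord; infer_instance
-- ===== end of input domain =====

-- B collapses the word into its run sequence first, then checks the runs for a duplicate;
-- simpler two-phase decomposition, same O(n) cost. On the empty word A raises IndexError
-- (excluded by Pre_); return-value equivalence is claimed on all non-empty words.

-- ===== PORT A =====
def checkGWLoop : List Char → Char → PySem.Set Char → Int
  | [], _, _ => 1
  | a :: rest, alphabet, checkSet =>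
    if a == alphabet then checkGWLoop rest alphabet checkSet
    else if PySem.Set.contains checkSet a then 0
    else checkGWLoop rest a (PySem.Set.add checkSet a)

def check_groupWord (word : String) : Int :=
  match PySem.Str.pyGet? word 0 with
  | none => 0   -- IndexError (word[0] on the empty word); unreachable under Pre_
  | some alphabet =>
    checkGWLoop word.toList alphabet (PySem.Set.add PySem.Set.empty alphabet)

-- ===== PORT B =====
def runsStep (runs : List Char) (c : Char) : List Char :=
  if runs = [] ∨ runs.getLast? ≠ some c then runs ++ [c] else runs

def check_groupWord_alt (word : String) : Int :=
  let runs := word.toList.foldl runsStep []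
  if runs.length = (PySem.Set.ofList runs).length then 1 else 0

-- ===== PRECONDITION & SPEC =====
-- Pre_ excludes only the empty word, on which A raises IndexError (word[0]).
def Pre_check_groupWord (word : String) : Prop := word ≠ ""
instance (word : String) : Decidable (Pre_check_groupWord word) := by
  unfold Pre_check_groupWord; infer_instance

def pvWitness_check_groupWord : String := "aabba"

def Spec_check_groupWord (word : String) (out : Int) : Prop := out = check_groupWord_alt word
instance (word : String) (out : Int) : Decidable (Spec_check_groupWord word out) := by
  unfold Spec_check_groupWord; infer_instance

-- ===== CLAIM (what is proved, stated in full; the proofs are below) =====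
def Claim_equal_check_groupWord : Prop :=
  ∀ (word : String), Dom_check_groupWord word → Pre_check_groupWord word →
    Spec_check_groupWord word (check_groupWord word)

-- ===== LEMMAS AND PROOFS =====

/-- The run letters of `chars` given that the previous letter was `prev`. -/
def runsFrom : List Char → Char → List Char
  | [], _ => []
  | c :: rest, prev => if c = prev then runsFrom rest prev else c :: runsFrom rest c

theorem checkGWLoop_eq (chars : List Char) :
    ∀ (alphabet : Char) (seen : PySem.Set Char),
      checkGWLoop chars alphabet seen =
        if (runsFrom chars alphabet).Nodup ∧ ∀ x ∈ runsFrom chars alphabet, x ∉ seen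
        then 1 else 0 := by
  induction chars with
  | nil => intro alphabet seen; simp [checkGWLoop, runsFrom]
  | cons a rest ih =>
    intro alphabet seen
    by_cases hax : a = alphabet
    · simp [checkGWLoop, runsFrom, hax, ih]
    · by_cases hmem : a ∈ seen
      · have hc : PySem.Set.contains seen a = true := by
          rw [PySem.Set.contains_iff]; exact hmem
        simp only [checkGWLoop, beq_iff_eq, hax, if_false, hc, if_true]
        rw [if_neg]
        simp only [runsFrom, hax, if_false]
        rintro ⟨-, hall⟩
        exact hall a (by simp) hmem
      · have hc : PySem.Set.contains seen a = false := by
          rw [Bool.eq_false_iff, Ne, PySem.Set.contains_iff]; exact hmem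
        simp only [checkGWLoop, beq_iff_eq, hax, if_false, hc, Bool.false_eq_true, if_false]
        rw [ih a (PySem.Set.add seen a)]
        apply if_congr _ rfl rfl
        simp only [runsFrom, hax, if_false, List.nodup_cons, List.mem_cons,
          PySem.Set.mem_add]
        constructor
        · rintro ⟨hnd, hall⟩
          refine ⟨⟨fun h => hall a h (Or.inr rfl), hnd⟩, ?_⟩
          rintro x (rfl | hx)
          · exact hmem
          · exact fun hxs => hall x hx (Or.inl hxs)
        · rintro ⟨⟨hna, hnd⟩, hall⟩
          refine ⟨hnd, ?_⟩
          rintro x hx (hxs | rfl)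
          · exact hall x (Or.inr hx) hxs
          · exact hna hx

theorem foldl_runsStep (chars : List Char) :
    ∀ (acc : List Char) (p : Char), acc.getLast? = some p →
      chars.foldl runsStep acc = acc ++ runsFrom chars p := by
  induction chars with
  | nil => intro acc p _; simp [runsFrom]
  | cons c rest ih =>
    intro acc p hlast
    have hacc : acc ≠ [] := by intro h; subst h; simp at hlast
    by_cases hcp : c = p
    · subst hcp
      have hstep : runsStep acc c = acc := by
        simp [runsStep, hlast, hacc]
      rw [List.foldl_cons, hstep,
        show runsFrom (c :: rest) c = runsFrom rest c by simp [runsFrom]]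
      exact ih acc c hlast
    · have hne : acc.getLast? ≠ some c := by
        intro h; rw [hlast] at h; exact hcp (Option.some.inj h).symm
      have hstep : runsStep acc c = acc ++ [c] := by
        simp [runsStep, hne]
      rw [List.foldl_cons, hstep,
        show runsFrom (c :: rest) p = c :: runsFrom rest c by simp [runsFrom, hcp]]
      rw [ih (acc ++ [c]) c (by simp)]
      simp

theorem ofList_sublist (l : List Char) : (PySem.Set.ofList l).Sublist l := by
  induction l using List.reverseRecOn with
  | nil => simp [PySem.Set.ofList_nil]
  | append_singleton xs x ih =>
    rw [PySem.Set.ofList_append_singleton, PySem.Set.add_eq_ite]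
    split_ifs with h
    · exact ih.trans (List.sublist_append_left xs [x])
    · exact ih.append (List.Sublist.refl [x])

theorem length_ofList_iff_nodup (l : List Char) :
    l.length = (PySem.Set.ofList l).length ↔ l.Nodup := by
  constructor
  · intro h
    have := (ofList_sublist l).eq_of_length h.symm
    rw [← this]
    exact PySem.Set.nodup_ofList l
  · intro h
    rw [PySem.Set.ofList_eq_self_of_nodup l h]

-- ===== VERDICT (by name: the statement is the Claim_ definition above) =====
theorem check_groupWord_spec : Claim_equal_check_groupWord := by
  intro word _ hpre
  unfold Spec_check_groupWord
  obtain ⟨c0, rest, hw⟩ : ∃ c rs, word.toList = c :: rs := by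
    cases h : word.toList with
    | nil => exact absurd (String.toList_eq_nil_iff.mp h) hpre
    | cons c rs => exact ⟨c, rs, rfl⟩
  have hget : PySem.Str.pyGet? word 0 = some c0 := by
    rw [show (0 : Int) = ((0 : Nat) : Int) from rfl, PySem.Str.pyGet?_natCast, hw]; rfl
  have hB : (c0 :: rest).foldl runsStep [] = c0 :: runsFrom rest c0 := by
    have h1 : runsStep [] c0 = [c0] := by simp [runsStep]
    rw [List.foldl_cons, h1]
    exact foldl_runsStep rest [c0] c0 (by simp)
  have hAeq : check_groupWord word = checkGWLoop rest c0 [c0] := by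
    unfold check_groupWord
    rw [hget, hw]
    simp [checkGWLoop, PySem.Set.add, PySem.Set.empty, PySem.Set.contains]
  have hBeq : check_groupWord_alt word =
      if (c0 :: runsFrom rest c0).length =
         (PySem.Set.ofList (c0 :: runsFrom rest c0)).length then 1 else 0 := by
    unfold check_groupWord_alt
    rw [hw]
    simp only [hB]
  rw [hAeq, hBeq, checkGWLoop_eq]
  rw [show ((if (c0 :: runsFrom rest c0).length =
      (PySem.Set.ofList (c0 :: runsFrom rest c0)).length then (1:Int) else 0)
      = if (c0 :: runsFrom rest c0).Nodup then (1:Int) else 0) from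
    if_congr (length_ofList_iff_nodup _) rfl rfl]
  apply if_congr _ rfl rfl
  simp only [List.nodup_cons, List.mem_singleton]
  constructor
  · rintro ⟨hnd, hall⟩
    exact ⟨fun h => hall c0 h rfl, hnd⟩
  · rintro ⟨hna, hnd⟩
    refine ⟨hnd, fun x hx h => ?_⟩
    subst h; exact hna hx
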